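-- pv_equiv track=rewrite | github.com/Euro-BioImaging/ome_zarr_pyramid | ome_zarr_pyramid/core/pyramid.py | get_common_indices
-- ===== SOURCE A (Python) =====
-- def get_common_set(lol):
--     flat = []
--     res = []
--     for l in lol: flat += l
--     for item in flat:
--         if all(item in l for l in lol):
--             if item not in res:
--                 res.append(item)
--     return res
--
-- def get_common_indices(axes):
--     common_axes = get_common_set(axes)
--     common_axes_indices = []
--     for ax in axes:
--         ids = []
--         for c in common_axes:
--             ids.append(ax.index(c))
--         common_axes_indices.append(ids)
--     return common_axes_indices
-- ===== SOURCE B (Python) =====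
-- def get_common_indices(axes):
--     # Build one first-occurrence-index dict per axis in a single pass each;
--     # the dicts then serve both membership tests and index lookups, and the
--     # common axes are just the keys of the first dict (insertion order =
--     # first-occurrence order in axes[0]) kept by every other dict.
--     if not axes:
--         return []
--     firsts = []
--     for ax in axes:
--         d = {}
--         for i, v in enumerate(ax):
--             d.setdefault(v, i)
--         firsts.append(d)
--     rest = firsts[1:]
--     common = [v for v in firsts[0] if all(v in d for d in rest)]
--     return [[d[v] for v in common] for d in firsts]
-- ===== Notes on version B (the rewrite author's own statement) =====
-- stated objective: faster
-- what changed: A flattens all lists, tests each flattened item against every list, dedups with a list scan, then calls list.index repeatedly; B never flattens: it builds a first-occurrence-index dict per axis in one pass each, takes the common axes directly as the keys of the first dict filtered by membership in the other dicts, and reads all indices out of the dicts.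
import Mathlib
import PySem

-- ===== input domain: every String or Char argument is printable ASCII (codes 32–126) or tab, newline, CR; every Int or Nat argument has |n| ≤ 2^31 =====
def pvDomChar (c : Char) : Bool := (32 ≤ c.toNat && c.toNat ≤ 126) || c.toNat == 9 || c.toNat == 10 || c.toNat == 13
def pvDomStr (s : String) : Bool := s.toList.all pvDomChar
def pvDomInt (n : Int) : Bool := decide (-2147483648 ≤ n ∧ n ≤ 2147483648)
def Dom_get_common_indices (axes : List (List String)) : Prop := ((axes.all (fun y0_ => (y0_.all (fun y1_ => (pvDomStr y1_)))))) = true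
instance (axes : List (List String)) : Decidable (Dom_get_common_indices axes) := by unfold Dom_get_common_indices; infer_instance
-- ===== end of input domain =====

-- B never flattens: one first-occurrence-index dict per axis serves membership and index
-- lookups, and the common axes are the first dict's keys kept by the other dicts (faster).

-- ===== PORT A =====
def get_common_set (lol : List (List String)) : List String :=
  let flat := lol.foldl (fun acc l => acc ++ l) []
  flat.foldl (fun res item =>
    if lol.all (fun l => l.contains item) then
      if res.contains item then res else res ++ [item]
    else res) []

def get_common_indices (axes : List (List String)) : List (List Int) :=
  let common_axes := get_common_set axes
  axes.foldl (fun acc ax =>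
    -- ax.index(c): ValueError is unreachable (c is common to every list), so the
    -- Option default 0 is never used.
    acc ++ [common_axes.foldl (fun ids c => ids ++ [(((PySem.List.index? ax c).getD 0 : Nat) : Int)]) []]) []

-- ===== PORT B =====
-- d.setdefault(v, i), keeping only the updated dict (the returned value is unused in Source B)
def pvFirstDict (ax : List String) : PySem.Dict String Int :=
  (PySem.List.enumerate ax 0).foldl (fun d p => d.setdefault p.2 p.1) PySem.Dict.empty

def get_common_indices_alt (axes : List (List String)) : List (List Int) :=
  match axes with
  | [] => []
  | _ :: _ =>
    let firsts := axes.foldl (fun acc ax => acc ++ [pvFirstDict ax]) []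
    let rest := PySem.List.slice firsts (some 1) none
    -- firsts[0]: axes is nonempty here, so the pyGetD default is unreachable
    let common := (PySem.List.pyGetD firsts 0 PySem.Dict.empty).keys.filter
        (fun v => rest.all (fun d => d.contains v))
    -- d[v]: v is a key of every dict (common to all axes), so the default 0 is unreachable
    firsts.map (fun d => common.map (fun v => d.getD v 0))

-- ===== PRECONDITION & SPEC =====
def Spec_get_common_indices (axes : List (List String)) (out : List (List Int)) : Prop := out = get_common_indices_alt axes
instance (axes : List (List String)) (out : List (List Int)) : Decidable (Spec_get_common_indices axes out) := by unfold Spec_get_common_indices; infer_instance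

-- ===== CLAIM =====
def Claim_equal_get_common_indices : Prop := ∀ (axes : List (List String)), Dom_get_common_indices axes → Spec_get_common_indices axes (get_common_indices axes)

-- ===== LEMMAS AND PROOFS =====

-- first-occurrence dedup of a list relative to an already-seen list
def dedupS : List String → List String → List String
  | [], _ => []
  | x :: l, s => if x ∈ s then dedupS l s else x :: dedupS l (x :: s)

theorem dedupS_congr (l : List String) : ∀ (s₁ s₂ : List String),
    (∀ y, y ∈ s₁ ↔ y ∈ s₂) → dedupS l s₁ = dedupS l s₂ := by
  induction l with
  | nil => intro _ _ _; rfl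
  | cons x l ih =>
    intro s₁ s₂ h
    simp only [dedupS]
    by_cases hx : x ∈ s₁
    · rw [if_pos hx, if_pos ((h x).mp hx)]; exact ih _ _ h
    · rw [if_neg hx, if_neg (fun hc => hx ((h x).mpr hc))]
      exact congrArg (x :: ·) (ih _ _ (by intro y; simp [h y]))

theorem mem_dedupS (l : List String) : ∀ (s : List String) (y : String),
    y ∈ dedupS l s ↔ y ∈ l ∧ y ∉ s := by
  induction l with
  | nil => intro s y; simp [dedupS]
  | cons x l ih =>
    intro s y
    simp only [dedupS]
    by_cases hx : x ∈ s
    · rw [if_pos hx, ih, List.mem_cons]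
      constructor
      · rintro ⟨h1, h2⟩; exact ⟨Or.inr h1, h2⟩
      · rintro ⟨rfl | h1, h2⟩
        · exact absurd hx h2
        · exact ⟨h1, h2⟩
    · rw [if_neg hx, List.mem_cons, ih, List.mem_cons, List.mem_cons]
      by_cases hyx : y = x
      · subst hyx; tauto
      · tauto

-- adding an item the filter rejects to the seen list does not change the filtered dedup
theorem dedupS_filter_cons (C : String → Bool) (x : String) (hx : C x = false) :
    ∀ (l s : List String), (dedupS l (x :: s)).filter C = (dedupS l s).filter C := by
  intro l
  induction l with
  | nil => intro s; rfl
  | cons z l ih =>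
    intro s
    simp only [dedupS]
    by_cases hzx : z = x
    · subst hzx
      rw [if_pos List.mem_cons_self]
      by_cases hzs : z ∈ s
      · rw [if_pos hzs]; exact ih s
      · rw [if_neg hzs, List.filter_cons_of_neg (by simp [hx])]
    · by_cases hzs : z ∈ s
      · rw [if_pos (List.mem_cons_of_mem _ hzs), if_pos hzs]; exact ih s
      · rw [if_neg (by simp [hzx, hzs]), if_neg hzs,
            dedupS_congr l (z :: x :: s) (x :: z :: s)
              (by intro y; simp only [List.mem_cons]; tauto)]
        cases hC : C z
        · rw [List.filter_cons_of_neg (by simp [hC]), List.filter_cons_of_neg (by simp [hC]), ih]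
        · rw [List.filter_cons_of_pos (by simp [hC]), List.filter_cons_of_pos (by simp [hC]), ih]

-- A's collecting loop is the filtered first-occurrence dedup
theorem afold_eq (C : String → Bool) :
    ∀ (l res : List String),
    l.foldl (fun res item =>
        if C item then (if res.contains item then res else res ++ [item]) else res) res =
      res ++ (dedupS l res).filter C := by
  intro l
  induction l with
  | nil => intro res; simp [dedupS]
  | cons x l ih =>
    intro res
    simp only [List.foldl_cons, dedupS]
    by_cases hx : x ∈ res
    · rw [if_pos hx]
      cases hC : C x
      · rw [if_neg (by simp), ih]
      · rw [if_pos (by simp), if_pos (by simpa using hx), ih]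
    · rw [if_neg hx]
      cases hC : C x
      · rw [if_neg (by simp), ih, List.filter_cons_of_neg (by simp [hC]),
            dedupS_filter_cons C x hC]
      · rw [if_pos (by simp), if_neg (by simpa using hx), ih,
            List.filter_cons_of_pos (by simp [hC]),
            dedupS_congr l (res ++ [x]) (x :: res) (by intro y; simp [or_comm])]
        simp
    
-- items the filter keeps lie in the prefix: the suffix contributes nothing
theorem dedupS_append_filter (C : String → Bool) (t : List String) :
    ∀ (a s : List String), (∀ y, C y = true → y ∈ a ∨ y ∈ s) →
    (dedupS (a ++ t) s).filter C = (dedupS a s).filter C := by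
  intro a
  induction a with
  | nil =>
    intro s hC
    simp only [List.nil_append, dedupS, List.filter_nil]
    apply List.filter_eq_nil_iff.mpr
    intro y hy hCy
    rcases hC y hCy with h | h
    · simp at h
    · exact ((mem_dedupS t s y).mp hy).2 h
  | cons x a ih =>
    intro s hC
    simp only [List.cons_append, dedupS]
    by_cases hx : x ∈ s
    · rw [if_pos hx, if_pos hx, ih s]
      intro y hCy
      rcases hC y hCy with h | h
      · rcases List.mem_cons.mp h with rfl | h
        · exact Or.inr hx
        · exact Or.inl h
      · exact Or.inr h
    · rw [if_neg hx, if_neg hx]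
      cases hC' : C x
      · rw [List.filter_cons_of_neg (by simp [hC']), List.filter_cons_of_neg (by simp [hC'])]
        apply ih
        intro y hCy
        rcases hC y hCy with h | h
        · rcases List.mem_cons.mp h with rfl | h
          · exact Or.inr (List.mem_cons_self)
          · exact Or.inl h
        · exact Or.inr (List.mem_cons_of_mem _ h)
      · rw [List.filter_cons_of_pos (by simp [hC']), List.filter_cons_of_pos (by simp [hC'])]
        congr 1
        apply ih
        intro y hCy
        rcases hC y hCy with h | h
        · rcases List.mem_cons.mp h with rfl | h
          · exact Or.inr (List.mem_cons_self)
          · exact Or.inl h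
        · exact Or.inr (List.mem_cons_of_mem _ h)

-- d.setdefault unfolded
theorem setdefault_eq_ite (d : PySem.Dict String Int) (k : String) (v : Int) :
    d.setdefault k v = if d.contains k then d else d.insert k v := by
  by_cases h : d.contains k = true
  · rw [PySem.Dict.setdefault_of_contains d v h, if_pos h]
  · rw [Bool.not_eq_true] at h
    rw [PySem.Dict.setdefault_of_not_contains d v h, if_neg (by simp [h])]

theorem pvFirstDict_eq (ax : List String) :
    pvFirstDict ax = (PySem.List.enumerate ax 0).foldl
      (fun (d : PySem.Dict String Int) p =>
        if d.contains p.2 then d else d.insert p.2 p.1) PySem.Dict.empty := by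
  unfold pvFirstDict
  simp only [setdefault_eq_ite]

-- the keys of the setdefault loop are the first-occurrence dedup of the list
theorem keys_firstDict_fold (ax : List String) : ∀ (st : Int) (d : PySem.Dict String Int),
    ((PySem.List.enumerate ax st).foldl
        (fun (d : PySem.Dict String Int) p =>
          if d.contains p.2 then d else d.insert p.2 p.1) d).keys =
      d.keys ++ dedupS ax d.keys := by
  induction ax with
  | nil => intro st d; simp [PySem.List.enumerate_nil, dedupS]
  | cons x l ih =>
    intro st d
    rw [PySem.List.enumerate_cons, List.foldl_cons]
    by_cases h : d.contains x = true
    · have hmem : x ∈ d.keys := (PySem.Dict.contains_iff_mem_keys d x).mp h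
      rw [if_pos h, ih, dedupS, if_pos hmem]
    · rw [Bool.not_eq_true] at h
      have hmem : x ∉ d.keys := fun hc => by
        rw [(PySem.Dict.contains_iff_mem_keys d x).mpr hc] at h; cases h
      rw [if_neg (by simp [h]), ih, PySem.Dict.keys_insert_of_not_contains d st h]
      rw [dedupS_congr l (d.keys ++ [x]) (x :: d.keys) (by intro y; simp [or_comm])]
      simp [dedupS, hmem]

theorem keys_pvFirstDict (ax : List String) : (pvFirstDict ax).keys = dedupS ax [] := by
  rw [pvFirstDict_eq, keys_firstDict_fold, PySem.Dict.keys_empty, List.nil_append]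

theorem contains_pvFirstDict (ax : List String) (v : String) :
    (pvFirstDict ax).contains v = ax.contains v := by
  rw [Bool.eq_iff_iff, PySem.Dict.contains_iff_mem_keys, keys_pvFirstDict, mem_dedupS]
  simp

-- B's first-occurrence-index dictionary looks up exactly what list.index returns.
theorem firstDict_get? (ax : List String) (c : String) (s : Int) (d : PySem.Dict String Int) :
    ((PySem.List.enumerate ax s).foldl
        (fun (d : PySem.Dict String Int) p =>
          if d.contains p.2 then d else d.insert p.2 p.1) d).get? c =
      if d.contains c then d.get? c
      else (PySem.List.index? ax c).map (fun n => s + (n : Int)) := by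
  induction ax generalizing s d with
  | nil =>
    simp only [PySem.List.enumerate_nil, List.foldl_nil]
    by_cases h : d.contains c = true
    · rw [if_pos h]
    · rw [Bool.not_eq_true] at h
      rw [if_neg (by simp [h]), (PySem.Dict.get?_eq_none_iff_contains d c).mpr h]
      simp [PySem.List.index?_eq_idxOf?]
  | cons x xs ih =>
    rw [PySem.List.enumerate_cons, List.foldl_cons]
    by_cases h : d.contains x = true
    · rw [if_pos h, ih]
      by_cases hx : x = c
      · subst hx
        rw [if_pos h, if_pos h]
      · by_cases hc : d.contains c = true
        · rw [if_pos hc, if_pos hc]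
        · rw [Bool.not_eq_true] at hc
          rw [if_neg (by simp [hc]), if_neg (by simp [hc]),
              PySem.List.index?_cons_of_ne xs hx]
          cases PySem.List.index? xs c with
          | none => rfl
          | some n =>
            simp
            try ring
    · rw [Bool.not_eq_true] at h
      rw [if_neg (by simp [h]), ih]
      by_cases hx : x = c
      · subst hx
        rw [if_pos (by rw [PySem.Dict.contains_insert]; simp),
            PySem.Dict.get?_insert_self, if_neg (by simp [h]),
            PySem.List.index?_cons_self]
        simp
      · have hins : (d.insert x s).contains c = d.contains c := by
          rw [PySem.Dict.contains_insert,
              beq_eq_false_iff_ne.mpr (fun (he : c = x) => hx he.symm), Bool.false_or]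
        by_cases hc : d.contains c = true
        · rw [hins, if_pos hc, if_pos hc,
              PySem.Dict.get?_insert_of_ne d s (fun (he : c = x) => hx he.symm)]
        · rw [Bool.not_eq_true] at hc
          rw [hins, if_neg (by simp [hc]), if_neg (by simp [hc]),
              PySem.List.index?_cons_of_ne xs hx]
          cases PySem.List.index? xs c with
          | none => rfl
          | some n =>
            simp
            try ring

theorem firstDict_getD (ax : List String) (c : String) :
    (pvFirstDict ax).getD c 0 = (((PySem.List.index? ax c).getD 0 : Nat) : Int) := by
  rw [pvFirstDict_eq, PySem.Dict.getD_eq_get?_getD, firstDict_get?]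
  simp only [PySem.Dict.contains_empty, Bool.false_eq_true, if_false]
  cases PySem.List.index? ax c with
  | none => rfl
  | some n => simp

-- ===== VERDICT =====
theorem get_common_indices_spec : Claim_equal_get_common_indices := by
  intro axes _
  unfold Spec_get_common_indices
  cases axes with
  | nil => rfl
  | cons a rest =>
    simp only [get_common_indices, get_common_indices_alt, get_common_set]
    rw [PySem.List.foldl_append_eq_flatMap (fun l => l) (a :: rest) []]
    rw [PySem.List.foldl_append_singleton_eq_map pvFirstDict (a :: rest) []]
    simp only [List.nil_append, List.flatMap_id', List.flatten_cons, List.map_cons]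
    rw [PySem.List.pyGetD_zero_cons, PySem.List.slice_from_one]
    rw [afold_eq _ _ [], List.nil_append]
    rw [dedupS_append_filter _ rest.flatten a []
        (fun y hy => Or.inl (by
          simp only [List.all_eq_true, List.mem_cons] at hy
          simpa using hy a (Or.inl rfl)))]
    rw [PySem.List.foldl_append_singleton_eq_map
          (fun ax => ((dedupS a []).filter
              (fun item => (a :: rest).all (fun l => l.contains item))).foldl
            (fun ids c => ids ++ [(((PySem.List.index? ax c).getD 0 : Nat) : Int)]) []) (a :: rest) []]
    simp only [List.nil_append, List.tail_cons]
    rw [keys_pvFirstDict]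
    have hfilter : (dedupS a []).filter
          (fun v => (rest.map pvFirstDict).all (fun d => d.contains v)) =
        (dedupS a []).filter (fun item => (a :: rest).all (fun l => l.contains item)) := by
      apply List.filter_congr
      intro v hv
      have hva : v ∈ a := ((mem_dedupS a [] v).mp hv).1
      simp only [List.all_map, List.all_cons]
      rw [Function.comp_def]
      simp only [contains_pvFirstDict]
      rw [List.contains_iff_mem.mpr hva, Bool.true_and]
    rw [hfilter]
    have helem : ∀ ax : List String,
        ((dedupS a []).filter (fun item => (a :: rest).all (fun l => l.contains item))).foldl
            (fun ids c => ids ++ [(((PySem.List.index? ax c).getD 0 : Nat) : Int)]) [] =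
          ((dedupS a []).filter (fun item => (a :: rest).all (fun l => l.contains item))).map
            (fun v => (pvFirstDict ax).getD v 0) := by
      intro ax
      rw [PySem.List.foldl_append_singleton_eq_map
            (fun c => (((PySem.List.index? ax c).getD 0 : Nat) : Int)) _ []]
      simp only [List.nil_append]
      apply List.map_congr_left
      intro c _
      exact (firstDict_getD ax c).symm
    rw [List.map_cons, List.map_map]
    exact congrArg₂ (· :: ·) (helem a)
      (List.map_congr_left (fun ax _ => helem ax))
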